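-- pv_equiv track=rewrite | github.com/1ordhokage/GP_homework | 3-scope-sequence/main.py | find_opening_brace
-- ===== SOURCE A (Python) =====
-- def find_opening_brace(sequence: list[str]) -> tuple[int, int]:
--     """Function that finds the opening brace index to be replaced.
--         Args:
--             sequence: Scope sequence.
--         Returns:
--             tuple[int, int]: Index of opening brace to be replaced and weight.
--     """
--     # difference between numbers of opening and closing braces
--     weight = 0
--     index = len(sequence) - 1
--     for i in range(index, -1, -1):
--         weight += -1 if sequence[i] == ")" else 1
--         if sequence[i] == "(" and weight < 0:
--             index = i
--             break
--     return index, weight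
-- ===== SOURCE B (Python) =====
-- def find_opening_brace(sequence: list[str]) -> tuple[int, int]:
--     """Two-phase: build suffix-weight table, then locate rightmost qualifying '('."""
--     n = len(sequence)
--     w = [0] * (n + 1)
--     for i in range(n - 1, -1, -1):
--         w[i] = w[i + 1] + (-1 if sequence[i] == ")" else 1)
--     for i in range(n - 1, -1, -1):
--         if sequence[i] == "(" and w[i] < 0:
--             return i, w[i]
--     return n - 1, w[0]
-- ===== Notes on version B (the rewrite author's own statement) =====
-- stated objective: alternative
-- what changed: Replaces the fused accumulate-and-break backward scan with a two-phase computation: first build a suffix-weight table, then locate the rightmost opening brace whose suffix weight is negative, falling back to (n-1, total weight).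
import Mathlib
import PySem

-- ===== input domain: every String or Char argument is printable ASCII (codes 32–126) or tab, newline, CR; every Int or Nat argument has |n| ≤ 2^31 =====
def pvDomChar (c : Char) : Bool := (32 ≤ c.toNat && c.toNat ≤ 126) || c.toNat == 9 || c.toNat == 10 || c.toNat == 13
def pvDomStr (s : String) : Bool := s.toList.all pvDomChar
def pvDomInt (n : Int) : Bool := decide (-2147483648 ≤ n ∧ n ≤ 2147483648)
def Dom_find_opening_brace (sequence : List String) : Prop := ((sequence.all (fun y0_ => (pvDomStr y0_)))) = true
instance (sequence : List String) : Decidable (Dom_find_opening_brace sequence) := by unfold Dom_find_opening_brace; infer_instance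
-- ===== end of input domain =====

-- B replaces A's fused accumulate-and-break backward scan by a two-phase algorithm
-- (build a suffix-weight table, then locate the rightmost qualifying '('); objective: alternative.

-- ===== PORT A =====
-- the 'for i in range(index, -1, -1)' loop with early break; weight/index are the loop state
def findLoopA (sequence : List String) : Int → Int → List Int → Int × Int
  | weight, index, [] => (index, weight)
  | weight, index, i :: rest =>
    let c := PySem.List.pyGetD sequence i ""
    let weight' := weight + (if c == ")" then -1 else 1)
    if c == "(" && decide (weight' < 0) then (i, weight')
    else findLoopA sequence weight' index rest

def find_opening_brace (sequence : List String) : Int × Int :=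
  let index : Int := (sequence.length : Int) - 1
  findLoopA sequence 0 index (PySem.List.pyRange index (-1) (-1))

-- ===== PORT B =====
-- phase 1 of Source B: the suffix-weight table w (length n+1, built from the right)
def suffixW : List String → List Int
  | [] => [0]
  | s :: rest =>
    let w := suffixW rest
    (w.headD 0 + (if s == ")" then -1 else 1)) :: w

-- phase 2 of Source B: scan from the highest index down, first (i.e. rightmost) match wins
def locateB : List String → List Int → Int → Option (Int × Int)
  | [], _, _ => none
  | s :: rest, ws, i =>
    match locateB rest ws.tail (i + 1) with
    | some r => some r
    | none => if s == "(" && decide (ws.headD 0 < 0) then some (i, ws.headD 0) else none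

def find_opening_brace_alt (sequence : List String) : Int × Int :=
  match locateB sequence (suffixW sequence) 0 with
  | some r => r
  | none => ((sequence.length : Int) - 1, (suffixW sequence).headD 0)

-- ===== PRECONDITION & SPEC =====
def Spec_find_opening_brace (sequence : List String) (out : Int × Int) : Prop := out = find_opening_brace_alt sequence
instance (sequence : List String) (out : Int × Int) : Decidable (Spec_find_opening_brace sequence out) := by unfold Spec_find_opening_brace; infer_instance

-- ===== CLAIM (what is proved, stated in full; the proofs are below) =====
def Claim_equal_find_opening_brace : Prop := ∀ (sequence : List String), Dom_find_opening_brace sequence → Spec_find_opening_brace sequence (find_opening_brace sequence)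

-- ===== LEMMAS AND PROOFS =====

-- common reference: right-to-left scan returning (break result, current weight)
def scanW : List String → Int → Option (Int × Int) × Int
  | [], w => (none, w)
  | s :: rest, w =>
    match scanW rest w with
    | (some r, t) => (some (r.1 + 1, r.2), t)
    | (none, t) =>
      let w' := t + (if s == ")" then -1 else 1)
      if s == "(" && decide (w' < 0) then (some (0, w'), w') else (none, w')

lemma scanW_concat (ys : List String) (x : String) (w : Int) :
    scanW (ys ++ [x]) w =
      (if x == "(" && decide ((w + (if x == ")" then -1 else 1)) < 0)
       then (some ((ys.length : Int), w + (if x == ")" then -1 else 1)), w + (if x == ")" then -1 else 1))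
       else scanW ys (w + (if x == ")" then -1 else 1))) := by
  induction ys with
  | nil => simp [scanW]
  | cons y ys ih =>
    simp only [List.cons_append, scanW, ih]
    by_cases hx : (x == "(" && decide ((w + (if x == ")" then -1 else 1)) < 0)) = true
    · simp only [hx, if_true]
      simp
    · simp only [hx, if_false, Bool.false_eq_true]

lemma findLoopA_append_irrel (xs : List String) (x : String) (idx : Int) (is : List Int) :
    ∀ w : Int, (∀ i ∈ is, 0 ≤ i ∧ i < (xs.length : Int)) →
    findLoopA (xs ++ [x]) w idx is = findLoopA xs w idx is := by
  induction is with
  | nil => intro w _; rfl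
  | cons i rest ih =>
    intro w h
    have hi := h i (by simp)
    have hget : PySem.List.pyGetD (xs ++ [x]) i "" = PySem.List.pyGetD xs i "" := by
      rw [PySem.List.pyGetD_eq_getElem _ _ hi.1 (by simp; omega),
          PySem.List.pyGetD_eq_getElem _ _ hi.1 (by omega)]
      rw [List.getElem_append_left (by omega)]
    simp only [findLoopA, hget]
    split <;> split
    · rfl
    · exact ih _ (fun j hj => h j (by simp [hj]))
    · rfl
    · exact ih _ (fun j hj => h j (by simp [hj]))

lemma findLoopA_eq_scanW (xs : List String) (idx : Int) :
    ∀ w : Int, findLoopA xs w idx (PySem.List.pyRange ((xs.length : Int) - 1) (-1) (-1)) =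
      (match scanW xs w with
       | (some r, _) => r
       | (none, t) => (idx, t)) := by
  induction xs using List.reverseRecOn with
  | nil =>
    intro w
    rw [PySem.List.pyRange_neg_one_eq_nil (by norm_num : ((List.length ([] : List String) : Int) - 1) ≤ -1)]
    rfl
  | append_singleton ys x ih =>
    intro w
    have hlen : ((ys ++ [x]).length : Int) - 1 = (ys.length : Int) := by simp
    rw [hlen, PySem.List.pyRange_neg_one_cons (by omega : (-1:Int) < (ys.length : Int))]
    have hget : PySem.List.pyGetD (ys ++ [x]) (ys.length : Int) "" = x := by
      simp [PySem.List.pyGetD]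
    simp only [findLoopA, hget, scanW_concat]
    by_cases hx : (x == "(" && decide ((w + (if x == ")" then -1 else 1)) < 0)) = true
    · simp only [hx, if_true]
    · simp only [hx, if_false, Bool.false_eq_true]
      rw [findLoopA_append_irrel ys x idx _ _
        (fun i hi => by
          have := (PySem.List.mem_pyRange_neg_one).1 hi
          omega)]
      exact ih _

lemma suffixW_head_total (xs : List String) :
    ∀ t : Int, scanW xs 0 = (none, t) → t = (suffixW xs).headD 0 := by
  induction xs with
  | nil => intro t h; simp [scanW] at h; simp [suffixW, h]
  | cons s rest ih =>
    intro t h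
    rcases hr : scanW rest 0 with ⟨r, t0⟩
    cases r with
    | some p => simp [scanW, hr] at h
    | none =>
      simp only [scanW, hr] at h
      split_ifs at h with h1 <;> simp_all [suffixW]

lemma locateB_eq_scanW (xs : List String) :
    ∀ i : Int, locateB xs (suffixW xs) i = (scanW xs 0).1.map (fun p => (p.1 + i, p.2)) := by
  induction xs with
  | nil => intro i; simp [locateB, scanW]
  | cons s rest ih =>
    intro i
    have htail : (suffixW (s :: rest)).tail = suffixW rest := by simp [suffixW]
    have hhead : (suffixW (s :: rest)).headD 0 = (suffixW rest).headD 0 + (if s == ")" then -1 else 1) := by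
      simp [suffixW, add_comm]
    rcases hr : scanW rest 0 with ⟨r, t0⟩
    cases r with
    | some p =>
      simp only [locateB, htail, ih (i + 1), hr, scanW]
      simp [Prod.ext_iff]
      omega
    | none =>
      have ht0 : t0 = (suffixW rest).headD 0 := suffixW_head_total rest t0 hr
      simp only [locateB, htail, hhead, ih (i + 1), hr, scanW, ← ht0]
      split_ifs <;> simp

lemma find_eq (sequence : List String) :
    find_opening_brace sequence = find_opening_brace_alt sequence := by
  unfold find_opening_brace find_opening_brace_alt
  rw [findLoopA_eq_scanW, locateB_eq_scanW]
  rcases hr : scanW sequence 0 with ⟨r, t0⟩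
  cases r with
  | some p => simp
  | none => simp [suffixW_head_total sequence t0 hr]

-- ===== VERDICT (by name: the statement is the Claim_ definition above) =====
theorem find_opening_brace_spec : Claim_equal_find_opening_brace := by
  intro sequence _
  unfold Spec_find_opening_brace
  exact find_eq sequence
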